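-- pv_equiv track=rewrite | github.com/jzumbrink/Reminder-Bot-Discord | datetime_handling/datetime_handling.py | extract_time_shortcuts
-- ===== SOURCE A (Python) =====
-- time_periods = {
--     'year': 'y',
--     'month': 'm',
--     'week': 'w',
--     'day': 'd',
--     'hour': 'h',
--     'minute': 'min',
--     'second': 's'
-- }
--
-- def extract_time_shortcuts(text: str):
--     time_periods_found = {value: 0 for value in time_periods.values()}
--     new_msg = []
--     for word in text.split(' '):
--         for time_period in time_periods.values():
--             if len(word) > len(time_period):
--                 if time_period == word[-len(time_period):] and word[:-len(time_period)].isdigit():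
--                     time_periods_found[time_period] += int(''.join(filter(lambda c: c.isdigit(), word)))
--                     break
--         else:
--             new_msg.append(word)
--     return ' '.join(new_msg), time_periods_found
-- ===== SOURCE B (Python) =====
-- # B: single pass with a last-character dispatch table (all seven suffixes end in
-- # distinct characters), replacing A's inner 7-way suffix scan per word.
--
-- _by_last_char = {'y': 'y', 'm': 'm', 'w': 'w', 'd': 'd', 'h': 'h', 'n': 'min', 's': 's'}
--
--
-- def extract_time_shortcuts(text: str):
--     found = {'y': 0, 'm': 0, 'w': 0, 'd': 0, 'h': 0, 'min': 0, 's': 0}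
--     kept = []
--     for word in text.split(' '):
--         suffix = _by_last_char.get(word[-1]) if word else None
--         if (suffix is not None and len(word) > len(suffix)
--                 and word.endswith(suffix) and word[:-len(suffix)].isdigit()):
--             found[suffix] += int(word[:-len(suffix)])
--         else:
--             kept.append(word)
--     return ' '.join(kept), found
-- ===== Notes on version B (the rewrite author's own statement) =====
-- stated objective: simpler
-- what changed: Replaces A's inner loop over all seven suffixes per word by a single dispatch-table lookup on the word's last character (the seven suffixes end in distinct characters), making one O(1) check per word.
import Mathlib
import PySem

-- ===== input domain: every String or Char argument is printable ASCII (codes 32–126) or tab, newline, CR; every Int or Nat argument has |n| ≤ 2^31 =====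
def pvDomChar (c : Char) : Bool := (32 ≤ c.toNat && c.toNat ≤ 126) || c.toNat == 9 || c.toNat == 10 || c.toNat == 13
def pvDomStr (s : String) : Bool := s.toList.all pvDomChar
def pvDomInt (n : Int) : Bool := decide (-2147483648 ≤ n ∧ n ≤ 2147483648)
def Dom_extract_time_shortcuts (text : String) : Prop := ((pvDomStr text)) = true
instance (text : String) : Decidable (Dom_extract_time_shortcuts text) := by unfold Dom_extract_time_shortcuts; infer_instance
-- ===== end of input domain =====

-- B replaces A's inner seven-suffix scan per word by one dispatch-table lookup on the
-- word's last character (the seven suffixes end in distinct characters); objective: simpler.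

-- ===== PORT A =====
-- time_periods.values() in insertion order
def pvVals : List String := ["y", "m", "w", "d", "h", "min", "s"]

-- A's per-suffix test: len(word) > len(tp) and tp == word[-len(tp):] and word[:-len(tp)].isdigit()
def pvCondA (word : List Char) (tp : String) : Bool :=
  word.length > tp.toList.length &&
  ((tp.toList == PySem.List.slice word (some (-(tp.toList.length : Int))) none) &&
   PySem.Chars.strIsdigit (PySem.List.slice word none (some (-(tp.toList.length : Int)))))

-- the inner 'for time_period in …: … break / else:' loop of A, as first-match search
def pvFindA (word : List Char) : List String → Option String
  | [] => none
  | tp :: rest => if pvCondA word tp then some tp else pvFindA word rest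

-- int(''.join(filter(lambda c: c.isdigit(), word))); A only evaluates it where the matched
-- word has a nonempty all-digit ASCII prefix, so inside Dom ofChars? is always some there
-- (the .getD 0 default is never the value).
def pvDigitsA (word : List Char) : Int :=
  (PySem.Int.ofChars? (word.filter PySem.Chars.isdigit)).getD 0

def pvStepA (st : PySem.Dict String Int × List (List Char)) (word : List Char) :
    PySem.Dict String Int × List (List Char) :=
  match pvFindA word pvVals with
  | some tp => (st.1.insert tp (st.1.getD tp 0 + pvDigitsA word), st.2)
  | none => (st.1, st.2 ++ [word])

def extract_time_shortcuts (text : String) : String × (List (String × Int)) :=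
  let d0 : PySem.Dict String Int := pvVals.foldl (fun d v => d.insert v 0) PySem.Dict.empty
  let st := (PySem.Chars.splitOn text.toList [' ']).foldl pvStepA (d0, [])
  (String.ofList (PySem.Chars.join [' '] st.2), st.1.items)

-- ===== PORT B =====
-- _by_last_char
def pvTable : PySem.Dict Char String :=
  PySem.Dict.ofList [('y', "y"), ('m', "m"), ('w', "w"), ('d', "d"), ('h', "h"), ('n', "min"), ('s', "s")]

-- B's guarded check: len(word) > len(suffix) and word.endswith(suffix) and word[:-len(suffix)].isdigit()
def pvCondB (word : List Char) (tp : String) : Bool :=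
  word.length > tp.toList.length &&
  (PySem.Chars.endswith word tp.toList &&
   PySem.Chars.strIsdigit (PySem.List.slice word none (some (-(tp.toList.length : Int)))))

-- '_by_last_char.get(word[-1]) if word else None', then the guarded check
def pvMatchB (word : List Char) : Option String :=
  let suffix? : Option String :=
    if word.isEmpty then none
    else
      match PySem.List.pyGet? word (-1) with
      | some c => pvTable.get? c
      | none => none
  match suffix? with
  | some tp => if pvCondB word tp then some tp else none
  | none => none

def pvStepB (st : PySem.Dict String Int × List (List Char)) (word : List Char) :
    PySem.Dict String Int × List (List Char) :=
  match pvMatchB word with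
  | some tp =>
      -- int(word[:-len(suffix)]); guarded by isdigit, so inside Dom always some
      (st.1.insert tp (st.1.getD tp 0 +
        (PySem.Int.ofChars? (PySem.List.slice word none (some (-(tp.toList.length : Int))))).getD 0), st.2)
  | none => (st.1, st.2 ++ [word])

def extract_time_shortcuts_alt (text : String) : String × (List (String × Int)) :=
  let d0 : PySem.Dict String Int :=
    PySem.Dict.ofList [("y", 0), ("m", 0), ("w", 0), ("d", 0), ("h", 0), ("min", 0), ("s", 0)]
  let st := (PySem.Chars.splitOn text.toList [' ']).foldl pvStepB (d0, [])
  (String.ofList (PySem.Chars.join [' '] st.2), st.1.items)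

-- ===== PRECONDITION & SPEC =====
def Spec_extract_time_shortcuts (text : String) (out : String × (List (String × Int))) : Prop := out = extract_time_shortcuts_alt text
instance (text : String) (out : String × (List (String × Int))) : Decidable (Spec_extract_time_shortcuts text out) := by unfold Spec_extract_time_shortcuts; infer_instance

-- ===== CLAIM (what is proved, stated in full; the proofs are below) =====
def Claim_equal_extract_time_shortcuts : Prop := ∀ (text : String), Dom_extract_time_shortcuts text → Spec_extract_time_shortcuts text (extract_time_shortcuts text)

-- ===== LEMMAS AND PROOFS =====

-- a nonempty word's last element, Python word[-1]
lemma pvGet_neg_one (w : List Char) (h : w ≠ []) :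
    PySem.List.pyGet? w (-1) = w.getLast? := by
  have hl : 0 < w.length := List.length_pos_iff.mpr h
  simp only [PySem.List.pyGet?, PySem.List.pyIdx?]
  split_ifs with h1 h2 <;> try omega
  · simp only [Option.bind_some, List.getLast?_eq_getElem?]
    norm_num

-- if A's condition holds, the word ends in the suffix's last character
lemma pvCondA_last (word : List Char) (tp : String) (htp : 0 < tp.toList.length)
    (h : pvCondA word tp = true) : word.getLast? = tp.toList.getLast? := by
  simp only [pvCondA, Bool.and_eq_true, beq_iff_eq, decide_eq_true_eq] at h
  obtain ⟨hlen, heq, -⟩ := h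
  rw [PySem.List.slice_from_neg_natCast word tp.toList.length htp] at heq
  have htpne : tp.toList ≠ [] := List.length_pos_iff.mp htp
  conv_lhs => rw [← List.take_append_drop (word.length - tp.toList.length) word]
  rw [List.getLast?_append, ← heq]
  cases hc : tp.toList.getLast? with
  | none => exact absurd (List.getLast?_eq_none_iff.mp hc) htpne
  | some c => rfl

lemma pvCondA_false (word : List Char) (tp : String) (htp : 0 < tp.toList.length)
    (hc : word.getLast? ≠ tp.toList.getLast?) : pvCondA word tp = false := by
  by_contra h
  exact hc (pvCondA_last word tp htp (by revert h; cases pvCondA word tp <;> simp))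

-- A's slice-equality test equals B's endswith test
lemma pvCondAB (word : List Char) (tp : String) (htp : 0 < tp.toList.length) :
    pvCondA word tp = pvCondB word tp := by
  rw [Bool.eq_iff_iff]
  simp only [pvCondA, pvCondB, Bool.and_eq_true, beq_iff_eq, decide_eq_true_eq]
  constructor
  · rintro ⟨hlen, heq, hd⟩
    refine ⟨hlen, ?_, hd⟩
    rw [PySem.Chars.endswith_iff, List.suffix_iff_eq_drop]
    rw [PySem.List.slice_from_neg_natCast word tp.toList.length htp] at heq
    exact heq
  · rintro ⟨hlen, hsuf, hd⟩
    refine ⟨hlen, ?_, hd⟩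
    rw [PySem.List.slice_from_neg_natCast word tp.toList.length htp]
    exact List.suffix_iff_eq_drop.mp (PySem.Chars.endswith_iff _ _ |>.mp hsuf)

-- the digit characters of a matched word are exactly its prefix before the suffix
lemma pvDigits_eq (word : List Char) (tp : String) (htp : 0 < tp.toList.length)
    (hnd : tp.toList.filter PySem.Chars.isdigit = [])
    (h : pvCondA word tp = true) :
    word.filter PySem.Chars.isdigit =
      PySem.List.slice word none (some (-(tp.toList.length : Int))) := by
  simp only [pvCondA, Bool.and_eq_true, beq_iff_eq, decide_eq_true_eq] at h
  obtain ⟨hlen, heq, hd⟩ := h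
  rw [PySem.List.slice_from_neg_natCast word tp.toList.length htp] at heq
  rw [PySem.List.slice_to_neg_natCast word tp.toList.length htp] at hd ⊢
  have hall : ∀ c ∈ word.take (word.length - tp.toList.length), PySem.Chars.isdigit c = true := by
    have hdef : PySem.Chars.strIsdigit (word.take (word.length - tp.toList.length)) =
        (!(word.take (word.length - tp.toList.length)).isEmpty &&
          (word.take (word.length - tp.toList.length)).all PySem.Chars.isdigit) := by
      simp [PySem.Chars.strIsdigit]
    rw [hdef, Bool.and_eq_true, List.all_eq_true] at hd
    exact fun c hc => hd.2 c hc
  conv_lhs => rw [← List.take_append_drop (word.length - tp.toList.length) word]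
  rw [List.filter_append, List.filter_eq_self.mpr hall, ← heq, hnd, List.append_nil]

lemma pvFindA_some (word : List Char) (l : List String) (tp : String)
    (h : pvFindA word l = some tp) : tp ∈ l ∧ pvCondA word tp = true := by
  induction l with
  | nil => simp [pvFindA] at h
  | cons a rest ih =>
      by_cases hc : pvCondA word a = true
      · simp [pvFindA, hc] at h; subst h; exact ⟨List.mem_cons_self, hc⟩
      · simp [pvFindA, hc] at h
        obtain ⟨h1, h2⟩ := ih h
        exact ⟨List.mem_cons_of_mem _ h1, h2⟩

-- a suffix whose last character is not the word's cannot match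
lemma pvKill (word : List Char) (c : Char) (hw : word.getLast? = some c) (tp : String)
    (h1 : 0 < tp.toList.length) (h2 : tp.toList.getLast? ≠ some c) : pvCondA word tp = false :=
  pvCondA_false word tp h1 (by rw [hw]; exact fun e => h2 e.symm)

-- the heart: A's scan over the seven suffixes = B's last-character dispatch
lemma pvFind_eq (word : List Char) : pvFindA word pvVals = pvMatchB word := by
  cases hw : word.getLast? with
  | none =>
      have : word = [] := List.getLast?_eq_none_iff.mp hw
      subst this; decide
  | some c =>
      have hne : word ≠ [] := by rintro rfl; simp at hw
      have hMB : pvMatchB word =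
          (match pvTable.get? c with
           | some tp => if pvCondB word tp then some tp else none
           | none => none) := by
        simp only [pvMatchB, List.isEmpty_eq_false_iff.mpr hne, Bool.false_eq_true,
          if_false, pvGet_neg_one word hne, hw]
      rw [hMB]
      by_cases h1 : c = 'y'
      · subst h1
        rw [show pvTable.get? 'y' = some "y" from by decide]
        simp only [pvVals, pvFindA,
          pvKill word _ hw "m" (by decide) (by decide),
          pvKill word _ hw "w" (by decide) (by decide),
          pvKill word _ hw "d" (by decide) (by decide),
          pvKill word _ hw "h" (by decide) (by decide),
          pvKill word _ hw "min" (by decide) (by decide),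
          pvKill word _ hw "s" (by decide) (by decide),
          pvCondAB word "y" (by decide)]
        simp
      by_cases h2 : c = 'm'
      · subst h2
        rw [show pvTable.get? 'm' = some "m" from by decide]
        simp only [pvVals, pvFindA,
          pvKill word _ hw "y" (by decide) (by decide),
          pvKill word _ hw "w" (by decide) (by decide),
          pvKill word _ hw "d" (by decide) (by decide),
          pvKill word _ hw "h" (by decide) (by decide),
          pvKill word _ hw "min" (by decide) (by decide),
          pvKill word _ hw "s" (by decide) (by decide),
          pvCondAB word "m" (by decide)]
        simp
      by_cases h3 : c = 'w'
      · subst h3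
        rw [show pvTable.get? 'w' = some "w" from by decide]
        simp only [pvVals, pvFindA,
          pvKill word _ hw "y" (by decide) (by decide),
          pvKill word _ hw "m" (by decide) (by decide),
          pvKill word _ hw "d" (by decide) (by decide),
          pvKill word _ hw "h" (by decide) (by decide),
          pvKill word _ hw "min" (by decide) (by decide),
          pvKill word _ hw "s" (by decide) (by decide),
          pvCondAB word "w" (by decide)]
        simp
      by_cases h4 : c = 'd'
      · subst h4
        rw [show pvTable.get? 'd' = some "d" from by decide]
        simp only [pvVals, pvFindA,
          pvKill word _ hw "y" (by decide) (by decide),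
          pvKill word _ hw "m" (by decide) (by decide),
          pvKill word _ hw "w" (by decide) (by decide),
          pvKill word _ hw "h" (by decide) (by decide),
          pvKill word _ hw "min" (by decide) (by decide),
          pvKill word _ hw "s" (by decide) (by decide),
          pvCondAB word "d" (by decide)]
        simp
      by_cases h5 : c = 'h'
      · subst h5
        rw [show pvTable.get? 'h' = some "h" from by decide]
        simp only [pvVals, pvFindA,
          pvKill word _ hw "y" (by decide) (by decide),
          pvKill word _ hw "m" (by decide) (by decide),
          pvKill word _ hw "w" (by decide) (by decide),
          pvKill word _ hw "d" (by decide) (by decide),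
          pvKill word _ hw "min" (by decide) (by decide),
          pvKill word _ hw "s" (by decide) (by decide),
          pvCondAB word "h" (by decide)]
        simp
      by_cases h6 : c = 'n'
      · subst h6
        rw [show pvTable.get? 'n' = some "min" from by decide]
        simp only [pvVals, pvFindA,
          pvKill word _ hw "y" (by decide) (by decide),
          pvKill word _ hw "m" (by decide) (by decide),
          pvKill word _ hw "w" (by decide) (by decide),
          pvKill word _ hw "d" (by decide) (by decide),
          pvKill word _ hw "h" (by decide) (by decide),
          pvKill word _ hw "s" (by decide) (by decide),
          pvCondAB word "min" (by decide)]
        simp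
      by_cases h7 : c = 's'
      · subst h7
        rw [show pvTable.get? 's' = some "s" from by decide]
        simp only [pvVals, pvFindA,
          pvKill word _ hw "y" (by decide) (by decide),
          pvKill word _ hw "m" (by decide) (by decide),
          pvKill word _ hw "w" (by decide) (by decide),
          pvKill word _ hw "d" (by decide) (by decide),
          pvKill word _ hw "h" (by decide) (by decide),
          pvKill word _ hw "min" (by decide) (by decide),
          pvCondAB word "s" (by decide)]
        simp
      · rw [show pvTable = (⟨[('y', "y"), ('m', "m"), ('w', "w"), ('d', "d"), ('h', "h"), ('n', "min"), ('s', "s")]⟩ : PySem.Dict Char String) from by decide]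
        simp only [PySem.Dict.get?_mk_cons, beq_iff_eq,
          Ne.symm h1, Ne.symm h2, Ne.symm h3, Ne.symm h4, Ne.symm h5, Ne.symm h6, Ne.symm h7,
          if_false, pvVals, pvFindA,
          pvKill word _ hw "y" (by decide) (by simp [Ne.symm h1]),
          pvKill word _ hw "m" (by decide) (by simp [Ne.symm h2]),
          pvKill word _ hw "w" (by decide) (by simp [Ne.symm h3]),
          pvKill word _ hw "d" (by decide) (by simp [Ne.symm h4]),
          pvKill word _ hw "h" (by decide) (by simp [Ne.symm h5]),
          pvKill word _ hw "min" (by decide) (by simp [Ne.symm h6]),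
          pvKill word _ hw "s" (by decide) (by simp [Ne.symm h7])]
        simp [PySem.Dict.get?]

lemma pvStep_eq : pvStepA = pvStepB := by
  funext st word
  unfold pvStepA pvStepB
  rw [pvFind_eq]
  cases h : pvMatchB word with
  | none => rfl
  | some tp =>
      have hA : pvFindA word pvVals = some tp := by rw [pvFind_eq, h]
      obtain ⟨hmem, hcond⟩ := pvFindA_some word pvVals tp hA
      have hnd : tp.toList.filter PySem.Chars.isdigit = [] := by
        have : ∀ s ∈ pvVals, s.toList.filter PySem.Chars.isdigit = [] := by decide
        exact this tp hmem
      have htp : 0 < tp.toList.length := by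
        have : ∀ s ∈ pvVals, 0 < s.toList.length := by decide
        exact this tp hmem
      simp only [pvDigitsA, pvDigits_eq word tp htp hnd hcond]

-- ===== VERDICT (by name: the statement is the Claim_ definition above) =====
theorem extract_time_shortcuts_spec : Claim_equal_extract_time_shortcuts := by
  intro text _
  unfold Spec_extract_time_shortcuts extract_time_shortcuts extract_time_shortcuts_alt
  rw [pvStep_eq]
  rfl
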